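-- pv_equiv track=rewrite | github.com/aaanh/onlyMFAANG | 767-reorganize-string.py | max_except
-- ===== SOURCE A (Python) =====
-- def max_except(table, last) -> int:
--     res = -1
--     largest = 0
--     for i, el in enumerate(table):
--         if el > largest and i != last:
--             res = i
--             largest = el
--     return res
-- ===== SOURCE B (Python) =====
-- def max_except(table, last) -> int:
--     cands = [(i, el) for i, el in enumerate(table) if i != last and el > 0]
--     if not cands:
--         return -1
--     return max(cands, key=lambda p: p[1])[0]
-- ===== Notes on version B (the rewrite author's own statement) =====
-- stated objective: idiomatic
-- what changed: Replaces the manual running-max loop with accumulator variables by a comprehension that filters the eligible (index, value) pairs plus the max builtin (first maximal key reproduces the strict-> earliest-winner tie-break).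
import Mathlib
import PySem

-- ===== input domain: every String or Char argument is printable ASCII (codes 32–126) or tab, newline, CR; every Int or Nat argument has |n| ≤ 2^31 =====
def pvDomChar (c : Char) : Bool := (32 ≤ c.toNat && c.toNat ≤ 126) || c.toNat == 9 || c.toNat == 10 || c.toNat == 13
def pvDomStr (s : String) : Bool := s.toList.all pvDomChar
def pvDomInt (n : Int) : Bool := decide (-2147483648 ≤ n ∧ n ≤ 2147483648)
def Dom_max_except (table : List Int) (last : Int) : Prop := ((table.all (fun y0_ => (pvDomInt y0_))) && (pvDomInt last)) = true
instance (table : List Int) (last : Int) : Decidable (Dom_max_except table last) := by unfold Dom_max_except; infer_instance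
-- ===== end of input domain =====

-- B re-implements A's manual running-max loop as a filter of eligible (index, value)
-- pairs followed by Python's max with a key (idiomatic; same return value everywhere).


-- ===== PORT A =====
def max_except (table : List Int) (last : Int) : Int :=
  let r := (PySem.List.enumerate table).foldl
    (fun (st : Int × Int) p => if p.2 > st.2 ∧ p.1 ≠ last then (p.1, p.2) else st)
    ((-1 : Int), (0 : Int))
  r.1

-- ===== PORT B =====
def max_except_alt (table : List Int) (last : Int) : Int :=
  let cands := (PySem.List.enumerate table).filter
    (fun p => decide (p.1 ≠ last) && decide (p.2 > 0))
  match PySem.List.max? cands (fun p => p.2) with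
  | none => -1
  | some p => p.1

-- ===== PRECONDITION & SPEC =====
def Spec_max_except (table : List Int) (last : Int) (out : Int) : Prop := out = max_except_alt table last
instance (table : List Int) (last : Int) (out : Int) : Decidable (Spec_max_except table last out) := by unfold Spec_max_except; infer_instance

-- ===== CLAIM (what is proved, stated in full; the proofs are below) =====
def Claim_equal_max_except : Prop := ∀ (table : List Int) (last : Int), Dom_max_except table last → Spec_max_except table last (max_except table last)

-- ===== LEMMAS AND PROOFS =====

-- pushing `some` through max?'s fold: once the accumulator is `some st` it stays a pair fold
theorem pv_max_cons (x : Int × Int) (t : List (Int × Int)) :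
    PySem.List.max? (x :: t) (fun p => p.2)
    = some (t.foldl (fun m y => if m.2 < y.2 then y else m) x) := by
  induction t generalizing x with
  | nil => rfl
  | cons y t ih =>
    show PySem.List.max? (x :: y :: t) (fun p => p.2) = _
    by_cases h : x.2 < y.2
    · rw [List.foldl_cons, if_pos h]
      rw [← ih y]
      simp [PySem.List.max?, h]
    · rw [List.foldl_cons, if_neg h]
      rw [← ih x]
      simp [PySem.List.max?, h]

-- once A's `largest` is positive, A's loop is the pair-max fold over the filtered list
theorem pv_pos (F : List (Int × Int)) (last : Int) (st : Int × Int) (h : 0 < st.2) :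
    F.foldl (fun (st : Int × Int) p => if p.2 > st.2 ∧ p.1 ≠ last then (p.1, p.2) else st) st
    = (F.filter (fun p => decide (p.1 ≠ last) && decide (p.2 > 0))).foldl
        (fun m x => if m.2 < x.2 then x else m) st := by
  induction F generalizing st with
  | nil => rfl
  | cons x t ih =>
    by_cases hp : x.1 ≠ last ∧ x.2 > 0
    · have hf : (decide (x.1 ≠ last) && decide (x.2 > 0)) = true := by
        simp [hp.1, hp.2]
      simp only [List.foldl_cons, List.filter_cons, hf, if_pos]
      by_cases hc : x.2 > st.2 ∧ x.1 ≠ last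
      · have : st.2 < x.2 := hc.1
        rw [if_pos hc, if_pos this]
        exact ih (x.1, x.2) hp.2
      · have : ¬ st.2 < x.2 := by
          intro hlt; exact hc ⟨hlt, hp.1⟩
        rw [if_neg hc, if_neg this]
        exact ih st h
    · have hf : (decide (x.1 ≠ last) && decide (x.2 > 0)) = false := by
        rcases not_and_or.mp hp with h1 | h2
        · simp [not_not.mp (fun hh => h1 hh)]
        · simp [h2]
      have hc : ¬ (x.2 > st.2 ∧ x.1 ≠ last) := by
        intro ⟨hlt, hne⟩
        rcases not_and_or.mp hp with h1 | h2
        · exact h1 hne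
        · exact h2 (lt_trans h hlt)
      simp only [List.foldl_cons, List.filter_cons, hf, if_neg hc]
      simpa using ih st h

-- from the initial state (-1, 0): either nothing passes the filter, or the first
-- survivor seeds the pair-max fold
theorem pv_zero (F : List (Int × Int)) (last : Int) :
    F.foldl (fun (st : Int × Int) p => if p.2 > st.2 ∧ p.1 ≠ last then (p.1, p.2) else st)
      ((-1 : Int), (0 : Int))
    = (match F.filter (fun p => decide (p.1 ≠ last) && decide (p.2 > 0)) with
       | [] => ((-1 : Int), (0 : Int))
       | x :: t => t.foldl (fun m x => if m.2 < x.2 then x else m) x) := by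
  induction F with
  | nil => rfl
  | cons x t ih =>
    by_cases hp : x.1 ≠ last ∧ x.2 > 0
    · have hf : (decide (x.1 ≠ last) && decide (x.2 > 0)) = true := by
        simp [hp.1, hp.2]
      have hc : x.2 > (((-1 : Int), (0 : Int)) : Int × Int).2 ∧ x.1 ≠ last := ⟨hp.2, hp.1⟩
      simp only [List.foldl_cons, List.filter_cons, hf, if_pos, if_pos hc]
      exact pv_pos t last (x.1, x.2) hp.2
    · have hf : (decide (x.1 ≠ last) && decide (x.2 > 0)) = false := by
        rcases not_and_or.mp hp with h1 | h2
        · simp [not_not.mp (fun hh => h1 hh)]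
        · simp [h2]
      have hc : ¬ (x.2 > (((-1 : Int), (0 : Int)) : Int × Int).2 ∧ x.1 ≠ last) := by
        intro ⟨hlt, hne⟩
        rcases not_and_or.mp hp with h1 | h2
        · exact h1 hne
        · exact h2 hlt
      simp only [List.foldl_cons, List.filter_cons, hf, if_neg hc]
      exact ih

-- ===== VERDICT (by name: the statement is the Claim_ definition above) =====
theorem max_except_spec : Claim_equal_max_except := by
  intro table last _
  unfold Spec_max_except max_except max_except_alt
  simp only []
  rw [pv_zero (PySem.List.enumerate table) last]
  cases hF : (PySem.List.enumerate table).filter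
      (fun p => decide (p.1 ≠ last) && decide (p.2 > 0)) with
  | nil => simp [PySem.List.max?]
  | cons x t => rw [pv_max_cons]
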